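-- pv_equiv track=rewrite | github.com/HaillonSeant/Adventcode2023 | Adventcode2023/day13/sdffzqsesdfg.py | lidiffcol
-- ===== SOURCE A (Python) =====
-- def lidiffcol(cas):
-- 	tmp=[]
-- 	li=[]
-- 	diff=0
-- 	for colonne in range(len(cas[0])):
-- 		st=""
-- 		for ligne in range(len(cas)):
-- 			st+=cas[ligne][colonne]
-- 		tmp.append(st)
-- 	for i in range(len(tmp)):
-- 		for i2 in range(i,len(tmp)):
-- 			for i3 in range(len(tmp[0])):
-- 				if tmp[i][i3] != tmp[i2][i3]:
-- 					diff+=1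
-- 			if diff==1:
-- 				for i3 in range(len(tmp[0])):
-- 					if tmp[i][i3]!=tmp[i2][i3]:
-- 						li.append((i3,i))#transformation coor
-- 			diff=0
-- 	return tuple(li)
-- ===== SOURCE B (Python) =====
-- def lidiffcol(cas):
--     # Hash-group identical columns, then compare only distinct representative
--     # columns with an early-exit scan for the single differing position; expand
--     # the groups into index pairs and sort once at the end.
--     n = len(cas)
--     w = len(cas[0])
--     cols = ["".join(row[c] for row in cas) for c in range(w)]
--     groups = {}
--     for i, col in enumerate(cols):
--         groups.setdefault(col, []).append(i)
--     reps = list(groups.items())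
--     found = []
--     rest = reps
--     while rest:
--         (ca, idsa), rest = rest[0], rest[1:]
--         for (cb, idsb) in rest:
--             pos = -1
--             for q in range(n):
--                 if ca[q] != cb[q]:
--                     if pos >= 0:
--                         pos = -2
--                         break
--                     pos = q
--             if pos >= 0:
--                 for i in idsa:
--                     for j in idsb:
--                         if i < j:
--                             found.append((i, j, pos))
--                         else:
--                             found.append((j, i, pos))
--     found.sort(key=lambda t: (t[0], t[1]))
--     return tuple((p, i) for (i, j, p) in found)
-- ===== Notes on version B (the rewrite author's own statement) =====
-- stated objective: faster
-- what changed: Instead of A's all-pairs column comparison with a count pass plus a re-scan pass per pair, B hash-groups identical columns in a dict, runs an early-exit single-diff-position scan only over pairs of distinct representative columns, expands the index groups into pairs and sorts once.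
import Mathlib
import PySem

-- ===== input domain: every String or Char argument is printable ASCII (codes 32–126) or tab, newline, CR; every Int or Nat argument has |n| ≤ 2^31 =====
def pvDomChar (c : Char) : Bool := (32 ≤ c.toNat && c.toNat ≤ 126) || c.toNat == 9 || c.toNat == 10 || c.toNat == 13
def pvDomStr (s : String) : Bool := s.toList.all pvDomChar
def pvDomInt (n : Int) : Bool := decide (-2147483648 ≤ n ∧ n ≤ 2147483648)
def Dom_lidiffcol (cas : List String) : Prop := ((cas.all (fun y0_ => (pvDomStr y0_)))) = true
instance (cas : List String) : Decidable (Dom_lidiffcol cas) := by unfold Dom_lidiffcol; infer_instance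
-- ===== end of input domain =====

-- B replaces A's all-pairs column comparison by hash-grouping identical columns in a
-- dict, an early-exit diff scan over distinct representatives, and one final sort
-- (objective: faster).

-- ===== PORT A =====
-- Python's `diff` is reset to 0 after every (i, i2) pair, so it is ported as a local
-- accumulator starting at 0 for each pair.  Columns (Python str) are List Char.
def lidiffcol (cas : List String) : List (Int × Int) :=
  let tmp : List (List Char) :=
    (PySem.List.pyRange 0 (PySem.Str.len (PySem.List.pyGetD cas 0 "")) 1).foldl
      (fun tmp colonne =>
        tmp ++ [(PySem.List.pyRange 0 (PySem.List.len cas) 1).foldl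
          (fun st ligne =>
            st ++ [PySem.List.pyGetD (PySem.List.pyGetD cas ligne "").toList colonne ' '])
          ([] : List Char)])
      []
  (PySem.List.pyRange 0 (PySem.List.len tmp) 1).foldl (fun li i =>
    (PySem.List.pyRange i (PySem.List.len tmp) 1).foldl (fun li i2 =>
      let diff : Int :=
        (PySem.List.pyRange 0 (PySem.List.len (PySem.List.pyGetD tmp 0 [])) 1).foldl
          (fun diff i3 =>
            if PySem.List.pyGetD (PySem.List.pyGetD tmp i []) i3 ' '
                ≠ PySem.List.pyGetD (PySem.List.pyGetD tmp i2 []) i3 ' '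
            then diff + 1 else diff) 0
      if diff = 1 then
        (PySem.List.pyRange 0 (PySem.List.len (PySem.List.pyGetD tmp 0 [])) 1).foldl
          (fun li i3 =>
            if PySem.List.pyGetD (PySem.List.pyGetD tmp i []) i3 ' '
                ≠ PySem.List.pyGetD (PySem.List.pyGetD tmp i2 []) i3 ' '
            then li ++ [(i3, i)] else li) li
      else li) li) []

-- ===== PORT B =====
-- `for q in range(n): … break` from Source B (early-exit diff-position scan)
def pvScanAux (ca cb : List Char) (qs : List Int) (pos : Int) : Int :=
  match qs with
  | [] => pos
  | q :: qs' =>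
    if PySem.List.pyGetD ca q ' ' ≠ PySem.List.pyGetD cb q ' ' then
      if pos ≥ 0 then -2
      else pvScanAux ca cb qs' q
    else pvScanAux ca cb qs' pos

-- `while rest: (ca, idsa), rest = rest[0], rest[1:]; for (cb, idsb) in rest: …` from Source B
def pvRepLoop (n : Int) (rest : List (List Char × List Int))
    (found : List (Int × Int × Int)) : List (Int × Int × Int) :=
  match rest with
  | [] => found
  | (ca, idsa) :: rest' =>
    pvRepLoop n rest'
      (rest'.foldl (fun found cbp =>
        let pos := pvScanAux ca cbp.1 (PySem.List.pyRange 0 n 1) (-1)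
        if pos ≥ 0 then
          idsa.foldl (fun found i =>
            cbp.2.foldl (fun found j =>
              if i < j then found ++ [(i, j, pos)] else found ++ [(j, i, pos)]) found) found
        else found) found)

def lidiffcol_alt (cas : List String) : List (Int × Int) :=
  let cols : List (List Char) :=
    (PySem.List.pyRange 0 (PySem.Str.len (PySem.List.pyGetD cas 0 "")) 1).map
      (fun c => cas.map (fun row => PySem.List.pyGetD row.toList c ' '))
  let groups : PySem.Dict (List Char) (List Int) :=
    (PySem.List.enumerate cols).foldl
      (fun d ic => d.modify ic.2 [] (· ++ [ic.1])) PySem.Dict.empty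
  let found := pvRepLoop (PySem.List.len cas) groups.items []
  (PySem.List.sorted2 found (fun t => t.1) (fun t => t.2.1) false).map
    (fun t => (t.2.2, t.1))

-- ===== PRECONDITION & SPEC =====
-- Pre_ excludes exactly the inputs where Python A raises: the empty list (cas[0] is an
-- IndexError) and ragged inputs where some row is shorter than row 0 (cas[ligne][colonne]
-- is an IndexError there).
def Pre_lidiffcol (cas : List String) : Prop :=
  cas ≠ [] ∧ ∀ s ∈ cas, (cas.headI).length ≤ s.length
instance (cas : List String) : Decidable (Pre_lidiffcol cas) := by
  unfold Pre_lidiffcol; infer_instance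

def pvWitness_lidiffcol : List String := ["#.#", "###", "..#"]

def Spec_lidiffcol (cas : List String) (out : List (Int × Int)) : Prop := out = lidiffcol_alt cas
instance (cas : List String) (out : List (Int × Int)) : Decidable (Spec_lidiffcol cas out) := by unfold Spec_lidiffcol; infer_instance

-- ===== CLAIM (what is proved, stated in full; the proofs are below) =====
def Claim_equal_lidiffcol : Prop := ∀ (cas : List String), Dom_lidiffcol cas → Pre_lidiffcol cas → Spec_lidiffcol cas (lidiffcol cas)

-- ===== LEMMAS AND PROOFS =====

-- abbreviations for the two grid dimensions as the ports compute them
def pvW (cas : List String) : Int := PySem.Str.len (PySem.List.pyGetD cas 0 "")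
def pvN (cas : List String) : Int := PySem.List.len cas

-- column c of the grid, as both ports read it
def pvCol (cas : List String) (c : Int) : List Char :=
  cas.map (fun row => PySem.List.pyGetD row.toList c ' ')

def pvCols (cas : List String) : List (List Char) :=
  (PySem.List.pyRange 0 (pvW cas) 1).map (pvCol cas)

-- character of column c at row q
def pvChar (cas : List String) (c q : Int) : Char :=
  PySem.List.pyGetD (pvCol cas c) q ' '

-- positions where columns i and j differ
def pvDs (cas : List String) (i j : Int) : List Int :=
  (PySem.List.pyRange 0 (pvN cas) 1).filter
    (fun q => decide (pvChar cas i q ≠ pvChar cas j q))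

-- the canonical answer: qualifying triples (i, j, p) in lexicographic order
def pvCanon (cas : List String) : List (Int × Int × Int) :=
  (PySem.List.pyRange 0 (pvW cas) 1).flatMap (fun i =>
    (PySem.List.pyRange (i + 1) (pvW cas) 1).flatMap (fun j =>
      if (pvDs cas i j).length = 1 then [(i, j, (pvDs cas i j).headI)] else []))

-- the qualifying predicate both programs compute
def pvQ (cas : List String) (t : Int × Int × Int) : Prop :=
  0 ≤ t.1 ∧ t.1 < t.2.1 ∧ t.2.1 < pvW cas ∧ pvDs cas t.1 t.2.1 = [t.2.2]

-- ---- basic facts ----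

theorem pvW_nonneg (cas : List String) : 0 ≤ pvW cas := by
  simp [pvW, PySem.Str.len_eq]

theorem pvCol_length (cas : List String) (c : Int) : (pvCol cas c).length = cas.length := by
  simp [pvCol]

theorem pvCols_length (cas : List String) : (pvCols cas).length = (pvW cas).toNat := by
  simp [pvCols, PySem.List.length_pyRange_one]

theorem pvCols_getElem (cas : List String) (m : Nat) (h : m < (pvCols cas).length) :
    (pvCols cas)[m] = pvCol cas (m : Int) := by
  simp only [pvCols, List.getElem_map]
  rw [PySem.List.getElem_pyRange_one]
  simp

theorem pvCols_getD (cas : List String) {i : Int} (h0 : 0 ≤ i) (h1 : i < pvW cas) :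
    PySem.List.pyGetD (pvCols cas) i [] = pvCol cas i := by
  rw [PySem.List.pyGetD_eq_getElem _ _ h0 (by rw [pvCols_length]; omega)]
  rw [pvCols_getElem]
  congr 1
  omega

theorem pvDs_self (cas : List String) (i : Int) : pvDs cas i i = [] := by
  simp [pvDs]

-- a Nodup list whose members are exactly p is [p]
theorem pv_eq_singleton_of {l : List Int} {p : Int} (hnd : l.Nodup)
    (hmem : ∀ x, x ∈ l ↔ x = p) : l = [p] := by
  cases l with
  | nil => exact absurd ((hmem p).mpr rfl) (by simp)
  | cons x t =>
    have hx : x = p := (hmem x).mp (List.mem_cons_self)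
    subst hx
    cases t with
    | nil => rfl
    | cons y u =>
      have hy : y = x := (hmem y).mp (by simp)
      subst hy
      simp at hnd

theorem pvDs_singleton_iff (cas : List String) (i j p : Int) :
    pvDs cas i j = [p] ↔
      (0 ≤ p ∧ p < pvN cas ∧ pvChar cas i p ≠ pvChar cas j p ∧
        ∀ q, 0 ≤ q → q < pvN cas → q ≠ p → pvChar cas i q = pvChar cas j q) := by
  unfold pvDs
  constructor
  · intro h
    have hp : p ∈ (PySem.List.pyRange 0 (pvN cas) 1).filter
        (fun q => decide (pvChar cas i q ≠ pvChar cas j q)) := by rw [h]; simp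
    rw [List.mem_filter, PySem.List.mem_pyRange_one] at hp
    obtain ⟨⟨hp0, hpn⟩, hd⟩ := hp
    refine ⟨hp0, hpn, by simpa using hd, ?_⟩
    intro q hq0 hqn hqp
    by_contra hne
    have hq : q ∈ (PySem.List.pyRange 0 (pvN cas) 1).filter
        (fun q => decide (pvChar cas i q ≠ pvChar cas j q)) := by
      rw [List.mem_filter, PySem.List.mem_pyRange_one]
      exact ⟨⟨hq0, hqn⟩, by simpa using hne⟩
    rw [h] at hq
    simp at hq
    exact hqp hq
  · rintro ⟨hp0, hpn, hdiff, heq⟩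
    apply pv_eq_singleton_of ((PySem.List.nodup_pyRange_one 0 (pvN cas)).filter _)
    intro x
    rw [List.mem_filter, PySem.List.mem_pyRange_one]
    constructor
    · rintro ⟨⟨hx0, hxn⟩, hd⟩
      by_contra hne
      have hd' : pvChar cas i x ≠ pvChar cas j x := by simpa using hd
      exact hd' (heq x hx0 hxn hne)
    · rintro rfl
      exact ⟨⟨hp0, hpn⟩, by simpa using hdiff⟩

theorem pvDs_symm (cas : List String) (i j : Int) : pvDs cas i j = pvDs cas j i := by
  unfold pvDs
  apply List.filter_congr
  intro q _
  simp [ne_comm]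

-- ---- A-side loop characterisation ----

theorem pvLen_cols_int (cas : List String) : PySem.List.len (pvCols cas) = pvW cas := by
  have := pvW_nonneg cas
  simp only [PySem.List.len, pvCols_length]
  omega

theorem pvLen_col_int (cas : List String) (c : Int) :
    PySem.List.len (pvCol cas c) = pvN cas := by
  simp [PySem.List.len, pvCol_length, pvN]

theorem pvTmp_eq (cas : List String) :
    (PySem.List.pyRange 0 (PySem.Str.len (PySem.List.pyGetD cas 0 "")) 1).foldl
      (fun tmp colonne =>
        tmp ++ [(PySem.List.pyRange 0 (PySem.List.len cas) 1).foldl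
          (fun st ligne =>
            st ++ [PySem.List.pyGetD (PySem.List.pyGetD cas ligne "").toList colonne ' '])
          ([] : List Char)])
      [] = pvCols cas := by
  rw [PySem.List.foldl_congr_mem _ _ (fun tmp colonne => tmp ++ [pvCol cas colonne]) []
    (fun acc c _ => by
      congr 1
      rw [PySem.List.foldl_append_singleton_eq_map]
      simp only [List.nil_append, List.singleton_inj]
      rw [show (fun ligne => PySem.List.pyGetD (PySem.List.pyGetD cas ligne "").toList c ' ')
          = (fun row => PySem.List.pyGetD row.toList c ' ') ∘ (fun j => PySem.List.pyGetD cas j "")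
          from rfl,
        ← List.map_map, PySem.List.map_pyGetD_pyRange_zero]
      rfl)]
  rw [PySem.List.foldl_append_singleton_eq_map]
  rfl

theorem pvA_pair (cas : List String) {i i2 : Int} (hW : 0 < pvW cas)
    (hi0 : 0 ≤ i) (hiw : i < pvW cas) (hj0 : 0 ≤ i2) (hjw : i2 < pvW cas)
    (li : List (Int × Int)) :
    (if ((PySem.List.pyRange 0 (PySem.List.len (PySem.List.pyGetD (pvCols cas) 0 [])) 1).foldl
          (fun diff i3 =>
            if PySem.List.pyGetD (PySem.List.pyGetD (pvCols cas) i []) i3 ' '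
                ≠ PySem.List.pyGetD (PySem.List.pyGetD (pvCols cas) i2 []) i3 ' '
            then diff + 1 else diff) (0 : Int)) = 1 then
        (PySem.List.pyRange 0 (PySem.List.len (PySem.List.pyGetD (pvCols cas) 0 [])) 1).foldl
          (fun li i3 =>
            if PySem.List.pyGetD (PySem.List.pyGetD (pvCols cas) i []) i3 ' '
                ≠ PySem.List.pyGetD (PySem.List.pyGetD (pvCols cas) i2 []) i3 ' '
            then li ++ [(i3, i)] else li) li
      else li)
      = li ++ (if (pvDs cas i i2).length = 1 then (pvDs cas i i2).map (fun p => (p, i)) else []) := by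
  rw [pvCols_getD cas hi0 hiw, pvCols_getD cas hj0 hjw,
    pvCols_getD cas (le_refl 0) hW, pvLen_col_int,
    PySem.List.foldl_ite_add_one
      (p := fun i3 => PySem.List.pyGetD (pvCol cas i) i3 ' ' ≠ PySem.List.pyGetD (pvCol cas i2) i3 ' '),
    PySem.List.foldl_append_ite
      (p := fun i3 => PySem.List.pyGetD (pvCol cas i) i3 ' ' ≠ PySem.List.pyGetD (pvCol cas i2) i3 ' ')
      (f := fun i3 => (i3, i))]
  have hcount : (List.countP
      (fun x => decide (PySem.List.pyGetD (pvCol cas i) x ' ' ≠ PySem.List.pyGetD (pvCol cas i2) x ' '))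
      (PySem.List.pyRange 0 (pvN cas) 1)) = (pvDs cas i i2).length := by
    rw [List.countP_eq_length_filter]
    rfl
  rw [hcount]
  by_cases hlen : (pvDs cas i i2).length = 1
  · rw [if_pos (by omega), if_pos hlen]
    rfl
  · rw [if_neg (by omega), if_neg hlen]
    simp

theorem pvA_eq_canon (cas : List String) :
    lidiffcol cas = (pvCanon cas).map (fun t => (t.2.2, t.1)) := by
  unfold lidiffcol
  simp only [pvTmp_eq, pvLen_cols_int]
  rcases eq_or_lt_of_le (pvW_nonneg cas) with hW | hW
  · rw [← hW]
    rw [show PySem.List.pyRange 0 0 1 = [] from PySem.List.pyRange_one_eq_nil (le_refl 0)]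
    unfold pvCanon
    rw [← hW]
    rw [show PySem.List.pyRange 0 0 1 = [] from PySem.List.pyRange_one_eq_nil (le_refl 0)]
    simp
  · have hinner : ∀ (li : List (Int × Int)), ∀ i ∈ PySem.List.pyRange 0 (pvW cas) 1,
        (PySem.List.pyRange i (pvW cas) 1).foldl
          (fun li i2 =>
            if ((PySem.List.pyRange 0 (PySem.List.len (PySem.List.pyGetD (pvCols cas) 0 [])) 1).foldl
                (fun diff i3 =>
                  if PySem.List.pyGetD (PySem.List.pyGetD (pvCols cas) i []) i3 ' '
                      ≠ PySem.List.pyGetD (PySem.List.pyGetD (pvCols cas) i2 []) i3 ' '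
                  then diff + 1 else diff) (0 : Int)) = 1 then
              (PySem.List.pyRange 0 (PySem.List.len (PySem.List.pyGetD (pvCols cas) 0 [])) 1).foldl
                (fun li i3 =>
                  if PySem.List.pyGetD (PySem.List.pyGetD (pvCols cas) i []) i3 ' '
                      ≠ PySem.List.pyGetD (PySem.List.pyGetD (pvCols cas) i2 []) i3 ' '
                  then li ++ [(i3, i)] else li) li
            else li) li
        = li ++ ((PySem.List.pyRange (i + 1) (pvW cas) 1).flatMap
            (fun j => if (pvDs cas i j).length = 1
              then (pvDs cas i j).map (fun p => (p, i)) else [])) := by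
      intro li i hi
      rw [PySem.List.mem_pyRange_one] at hi
      rw [PySem.List.pyRange_one_cons hi.2, List.foldl_cons,
        pvA_pair cas hW hi.1 hi.2 hi.1 hi.2 li, pvDs_self]
      simp only [List.length_nil, List.map_nil]
      rw [if_neg (by omega), List.append_nil]
      rw [PySem.List.foldl_congr_mem _ _
        (fun li j => li ++ (if (pvDs cas i j).length = 1
          then (pvDs cas i j).map (fun p => (p, i)) else [])) li
        (fun acc j hj => by
          rw [PySem.List.mem_pyRange_one] at hj
          exact pvA_pair cas hW hi.1 hi.2 (by omega) hj.2 acc)]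
      exact PySem.List.foldl_append_eq_flatMap _ _ _
    rw [PySem.List.foldl_congr_mem _ _
      (fun li i => li ++ ((PySem.List.pyRange (i + 1) (pvW cas) 1).flatMap
        (fun j => if (pvDs cas i j).length = 1
          then (pvDs cas i j).map (fun p => (p, i)) else []))) [] hinner,
      PySem.List.foldl_append_eq_flatMap, List.nil_append]
    unfold pvCanon
    rw [List.map_flatMap]
    apply congrArg (fun g => List.flatMap g (PySem.List.pyRange 0 (pvW cas) 1))
    funext i
    rw [List.map_flatMap]
    apply congrArg (fun g => List.flatMap g (PySem.List.pyRange (i + 1) (pvW cas) 1))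
    funext j
    by_cases h : (pvDs cas i j).length = 1
    · obtain ⟨x, hx⟩ := List.length_eq_one_iff.mp h
      simp [hx]
    · simp [h]

-- ---- PART B: the dict of groups and the representative loop, characterised ----

def pvL (cas : List String) : List (List Char × Int) :=
  (PySem.List.enumerate (pvCols cas)).map (fun ic => (ic.2, ic.1))

def pvKs (cas : List String) : List (List Char) :=
  PySem.Set.ofList ((pvL cas).map (fun q => q.1))

def pvIdxs (cas : List String) (k : List Char) : List Int :=
  ((pvL cas).filter (fun q => q.1 == k)).map (fun q => q.2)

def pvGroups (cas : List String) : PySem.Dict (List Char) (List Int) :=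
  (pvL cas).foldl (fun d q => d.modify q.1 [] (· ++ [q.2])) PySem.Dict.empty

def pvNorm (pos i j : Int) : Int × Int × Int :=
  if i < j then (i, j, pos) else (j, i, pos)

def pvExpand (pos : Int) (a b : List Int) : List (Int × Int × Int) :=
  a.flatMap (fun i => b.map (fun j => pvNorm pos i j))

def pvContrib (cas : List String) (ka kb : List Char) : List (Int × Int × Int) :=
  if pvScanAux ka kb (PySem.List.pyRange 0 (pvN cas) 1) (-1) ≥ 0 then
    pvExpand (pvScanAux ka kb (PySem.List.pyRange 0 (pvN cas) 1) (-1))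
      (pvIdxs cas ka) (pvIdxs cas kb)
  else []

def pvPairsR (cas : List String) : List (List Char) → List (Int × Int × Int)
  | [] => []
  | k :: rest => rest.flatMap (fun k' => pvContrib cas k k') ++ pvPairsR cas rest

def pvFound (cas : List String) : List (Int × Int × Int) :=
  pvPairsR cas (pvKs cas)

theorem pvCols_def (cas : List String) :
    pvCols cas = (PySem.List.pyRange 0 (PySem.Str.len (PySem.List.pyGetD cas 0 "")) 1).map
      (fun c => cas.map (fun row => PySem.List.pyGetD row.toList c ' ')) := rfl

theorem pvGroups_port (cas : List String) :
    (PySem.List.enumerate (pvCols cas)).foldl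
      (fun d ic => d.modify ic.2 [] (· ++ [ic.1])) PySem.Dict.empty = pvGroups cas := by
  unfold pvGroups pvL
  rw [List.foldl_map]

theorem pvGroups_keys (cas : List String) : (pvGroups cas).keys = pvKs cas := by
  unfold pvGroups pvKs
  rw [PySem.Dict.keys_foldl_modify_key (pvL cas) (fun q => q.1) [] (fun _ q v => v ++ [q.2])]
  rfl

theorem pvGroups_keys_nodup (cas : List String) : (pvGroups cas).keys.Nodup := by
  rw [pvGroups_keys]
  exact PySem.Set.nodup_ofList _

theorem pvGroups_getD (cas : List String) (k : List Char) :
    (pvGroups cas).getD k [] = pvIdxs cas k := by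
  unfold pvGroups pvIdxs
  rw [PySem.Dict.getD_foldl_modify_append]
  simp

theorem pvGroups_items (cas : List String) :
    (pvGroups cas).items = (pvKs cas).map (fun k => (k, pvIdxs cas k)) := by
  rw [PySem.Dict.items_eq_map_keys _ (pvGroups_keys_nodup cas) [], pvGroups_keys]
  exact List.map_congr_left (fun k _ => by rw [pvGroups_getD])

-- the nested expansion loops of Source B
theorem pvExpandLoop_eq (pos : Int) (a b : List Int) (f0 : List (Int × Int × Int)) :
    a.foldl (fun found i =>
        b.foldl (fun found j =>
          if i < j then found ++ [(i, j, pos)] else found ++ [(j, i, pos)]) found) f0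
      = f0 ++ pvExpand pos a b := by
  induction a generalizing f0 with
  | nil => simp [pvExpand]
  | cons i a ih =>
    rw [List.foldl_cons, ih]
    have hinner : ∀ (f1 : List (Int × Int × Int)),
        b.foldl (fun found j =>
          if i < j then found ++ [(i, j, pos)] else found ++ [(j, i, pos)]) f1
        = f1 ++ b.map (fun j => pvNorm pos i j) := by
      intro f1
      rw [PySem.List.foldl_congr_mem _ _
        (fun found j => found ++ [pvNorm pos i j]) f1
        (fun acc j _ => by
          show (if i < j then acc ++ [(i, j, pos)] else acc ++ [(j, i, pos)])
              = acc ++ [pvNorm pos i j]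
          unfold pvNorm
          split <;> rfl)]
      exact PySem.List.foldl_append_singleton_eq_map _ _ _
    rw [hinner]
    simp [pvExpand]

theorem pvRepLoop_eq (cas : List String) (ks : List (List Char))
    (found : List (Int × Int × Int)) :
    pvRepLoop (pvN cas) (ks.map (fun k => (k, pvIdxs cas k))) found
      = found ++ pvPairsR cas ks := by
  induction ks generalizing found with
  | nil => simp [pvRepLoop, pvPairsR]
  | cons k ks ih =>
    rw [List.map_cons, pvRepLoop, ih, List.foldl_map]
    rw [PySem.List.foldl_congr_mem _ _
      (fun acc k' => acc ++ pvContrib cas k k') found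
      (fun acc k' _ => by
        show (if pvScanAux k (k', pvIdxs cas k').1 (PySem.List.pyRange 0 (pvN cas) 1) (-1) ≥ 0
            then (pvIdxs cas k).foldl (fun found i =>
              (k', pvIdxs cas k').2.foldl (fun found j =>
                if i < j
                then found ++ [(i, j, pvScanAux k (k', pvIdxs cas k').1 (PySem.List.pyRange 0 (pvN cas) 1) (-1))]
                else found ++ [(j, i, pvScanAux k (k', pvIdxs cas k').1 (PySem.List.pyRange 0 (pvN cas) 1) (-1))]) found) acc
            else acc) = acc ++ pvContrib cas k k'
        unfold pvContrib
        by_cases hpos : pvScanAux k k' (PySem.List.pyRange 0 (pvN cas) 1) (-1) ≥ 0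
        · rw [if_pos hpos, if_pos hpos, pvExpandLoop_eq]
        · rw [if_neg hpos, if_neg hpos, List.append_nil])]
    rw [PySem.List.foldl_append_eq_flatMap]
    simp [pvPairsR]

theorem pvB_found (cas : List String) :
    lidiffcol_alt cas =
      (PySem.List.sorted2 (pvFound cas) (fun t => t.1) (fun t => t.2.1) false).map
        (fun t => (t.2.2, t.1)) := by
  unfold lidiffcol_alt
  rw [← pvCols_def]
  dsimp only []
  rw [pvGroups_port, pvGroups_items,
    show PySem.List.len cas = pvN cas from rfl, pvRepLoop_eq, List.nil_append]
  rfl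

-- ---- scan characterisation ----

theorem pvScanAux_pos (ca cb : List Char) (qs : List Int) (p : Int) (hp : 0 ≤ p) :
    pvScanAux ca cb qs p =
      if qs.filter (fun q => decide (PySem.List.pyGetD ca q ' ' ≠ PySem.List.pyGetD cb q ' ')) = []
      then p else -2 := by
  induction qs generalizing p with
  | nil => simp [pvScanAux]
  | cons q qs ih =>
    by_cases h : PySem.List.pyGetD ca q ' ' ≠ PySem.List.pyGetD cb q ' '
    · have hc : (q :: qs).filter (fun q => decide (PySem.List.pyGetD ca q ' ' ≠ PySem.List.pyGetD cb q ' '))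
          = q :: qs.filter (fun q => decide (PySem.List.pyGetD ca q ' ' ≠ PySem.List.pyGetD cb q ' ')) := by
        simp [h]
      rw [pvScanAux, if_pos h, if_pos (by omega), hc, if_neg (by simp)]
    · have hc : (q :: qs).filter (fun q => decide (PySem.List.pyGetD ca q ' ' ≠ PySem.List.pyGetD cb q ' '))
          = qs.filter (fun q => decide (PySem.List.pyGetD ca q ' ' ≠ PySem.List.pyGetD cb q ' ')) := by
        simp [h]
      rw [pvScanAux, if_neg h, hc, ih p hp]

theorem pvScanAux_neg (ca cb : List Char) (qs : List Int) (hqs : ∀ q ∈ qs, 0 ≤ q) :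
    pvScanAux ca cb qs (-1) =
      match qs.filter (fun q => decide (PySem.List.pyGetD ca q ' ' ≠ PySem.List.pyGetD cb q ' ')) with
      | [] => -1
      | [p] => p
      | _ :: _ :: _ => -2 := by
  induction qs with
  | nil => simp [pvScanAux]
  | cons q qs ih =>
    by_cases h : PySem.List.pyGetD ca q ' ' ≠ PySem.List.pyGetD cb q ' '
    · have hc : (q :: qs).filter (fun q => decide (PySem.List.pyGetD ca q ' ' ≠ PySem.List.pyGetD cb q ' '))
          = q :: qs.filter (fun q => decide (PySem.List.pyGetD ca q ' ' ≠ PySem.List.pyGetD cb q ' ')) := by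
        simp [h]
      rw [pvScanAux, if_pos h, if_neg (by omega),
        pvScanAux_pos ca cb qs q (hqs q (by simp)), hc]
      cases hf : qs.filter (fun q => decide (PySem.List.pyGetD ca q ' ' ≠ PySem.List.pyGetD cb q ' ')) with
      | nil => rw [if_pos rfl]
      | cons a l => rw [if_neg (by simp)]
    · have hc : (q :: qs).filter (fun q => decide (PySem.List.pyGetD ca q ' ' ≠ PySem.List.pyGetD cb q ' '))
          = qs.filter (fun q => decide (PySem.List.pyGetD ca q ' ' ≠ PySem.List.pyGetD cb q ' ')) := by
        simp [h]
      rw [pvScanAux, if_neg h, hc, ih (fun x hx => hqs x (by simp [hx]))]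

theorem pvScan_cols (cas : List String) (i j : Int) :
    pvScanAux (pvCol cas i) (pvCol cas j) (PySem.List.pyRange 0 (pvN cas) 1) (-1) =
      match pvDs cas i j with
      | [] => -1
      | [p] => p
      | _ :: _ :: _ => -2 := by
  rw [pvScanAux_neg _ _ _ (fun q hq => ((PySem.List.mem_pyRange_one).mp hq).1)]
  rfl

-- ---- membership and nodup for pvFound ----

theorem mem_pvIdxs (cas : List String) (k : List Char) (i : Int) :
    i ∈ pvIdxs cas k ↔ (0 ≤ i ∧ i < pvW cas ∧ pvCol cas i = k) := by
  unfold pvIdxs pvL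
  simp only [List.mem_map, List.mem_filter, PySem.List.mem_enumerate_iff, beq_iff_eq,
    pvCols_length, pvCols_getElem]
  constructor
  · rintro ⟨a, ⟨⟨ic, ⟨m, hm, rfl⟩, rfl⟩, h1⟩, h2⟩
    simp only at h1 h2
    have hW := pvW_nonneg cas
    refine ⟨by omega, by omega, ?_⟩
    rw [show i = ((m : Nat) : Int) from by omega]
    exact h1
  · rintro ⟨h0, hw, hk⟩
    refine ⟨(k, i), ⟨⟨(0 + (i.toNat : Int), pvCol cas ((i.toNat : Nat) : Int)), ⟨i.toNat, by omega, rfl⟩, ?_⟩, rfl⟩, rfl⟩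
    simp only
    rw [show ((i.toNat : Nat) : Int) = i from by omega, hk]
    simp

theorem pairwise_pvIdxs (cas : List String) (k : List Char) :
    (pvIdxs cas k).Pairwise (· < ·) := by
  unfold pvIdxs pvL
  rw [List.pairwise_map]
  apply List.Pairwise.filter
  rw [List.pairwise_map]
  exact PySem.List.pairwise_lt_enumerate (pvCols cas) 0

theorem mem_pvKs_of (cas : List String) {i : Int} (h0 : 0 ≤ i) (hw : i < pvW cas) :
    pvCol cas i ∈ pvKs cas := by
  unfold pvKs pvL
  rw [PySem.Set.mem_ofList]
  simp only [List.map_map, List.mem_map, PySem.List.mem_enumerate_iff]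
  refine ⟨(0 + (i.toNat : Int), pvCol cas ((i.toNat : Nat) : Int)),
    ⟨i.toNat, by rw [pvCols_length]; omega, by rw [pvCols_getElem]⟩, ?_⟩
  simp only [Function.comp]
  rw [show ((i.toNat : Nat) : Int) = i from by omega]

theorem pvNorm_symm (pos i j : Int) : pvNorm pos i j = pvNorm pos j i := by
  unfold pvNorm
  rcases lt_trichotomy i j with h | h | h
  · rw [if_pos h, if_neg (by omega)]
  · subst h
    rfl
  · rw [if_neg (by omega), if_pos h]

theorem mem_pvExpand (pos : Int) (a b : List Int) (t : Int × Int × Int) :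
    t ∈ pvExpand pos a b ↔ ∃ i ∈ a, ∃ j ∈ b, t = pvNorm pos i j := by
  simp only [pvExpand, List.mem_flatMap, List.mem_map]
  constructor
  · rintro ⟨i, hi, j, hj, rfl⟩
    exact ⟨i, hi, j, hj, rfl⟩
  · rintro ⟨i, hi, j, hj, rfl⟩
    exact ⟨i, hi, j, hj, rfl⟩

theorem pvScanAux_symm (ca cb : List Char) (qs : List Int) (pos : Int) :
    pvScanAux ca cb qs pos = pvScanAux cb ca qs pos := by
  induction qs generalizing pos with
  | nil => rfl
  | cons q qs ih =>
    by_cases h : PySem.List.pyGetD ca q ' ' = PySem.List.pyGetD cb q ' '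
    · rw [pvScanAux, pvScanAux, if_neg (by simp [h]), if_neg (by simp [h.symm]), ih]
    · rw [pvScanAux, pvScanAux, if_pos h, if_pos (Ne.symm h)]
      split
      · rfl
      · exact ih q

theorem mem_pvContrib_symm (cas : List String) (ka kb : List Char) (t : Int × Int × Int) :
    t ∈ pvContrib cas ka kb ↔ t ∈ pvContrib cas kb ka := by
  unfold pvContrib
  rw [pvScanAux_symm kb ka]
  by_cases hpos : pvScanAux ka kb (PySem.List.pyRange 0 (pvN cas) 1) (-1) ≥ 0
  · rw [if_pos hpos, if_pos hpos, mem_pvExpand, mem_pvExpand]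
    constructor
    · rintro ⟨i, hi, j, hj, rfl⟩
      exact ⟨j, hj, i, hi, pvNorm_symm _ _ _⟩
    · rintro ⟨i, hi, j, hj, rfl⟩
      exact ⟨j, hj, i, hi, pvNorm_symm _ _ _⟩
  · rw [if_neg hpos, if_neg hpos]

theorem mem_pvPairsR (cas : List String) (ks : List (List Char))
    (hnd : ks.Pairwise (· ≠ ·)) (t : Int × Int × Int) :
    t ∈ pvPairsR cas ks ↔
      ∃ ka ∈ ks, ∃ kb ∈ ks, ka ≠ kb ∧ t ∈ pvContrib cas ka kb := by
  induction ks with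
  | nil => simp [pvPairsR]
  | cons k ks ih =>
    rw [List.pairwise_cons] at hnd
    obtain ⟨hk, htl⟩ := hnd
    simp only [pvPairsR, List.mem_append, List.mem_flatMap, ih htl]
    constructor
    · rintro (⟨k', hk', ht⟩ | ⟨ka, ha, kb, hb, hne, ht⟩)
      · exact ⟨k, by simp, k', by simp [hk'], hk k' hk', ht⟩
      · exact ⟨ka, by simp [ha], kb, by simp [hb], hne, ht⟩
    · rintro ⟨ka, ha, kb, hb, hne, ht⟩
      rcases List.mem_cons.mp ha with rfl | ha'
      · rcases List.mem_cons.mp hb with rfl | hb'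
        · exact absurd rfl hne
        · exact Or.inl ⟨kb, hb', ht⟩
      · rcases List.mem_cons.mp hb with rfl | hb'
        · exact Or.inl ⟨ka, ha', (mem_pvContrib_symm cas ka _ t).mp ht⟩
        · exact Or.inr ⟨ka, ha', kb, hb', hne, ht⟩

theorem mem_pvFound (cas : List String) (t : Int × Int × Int) :
    t ∈ pvFound cas ↔ pvQ cas t := by
  obtain ⟨lo, hi, p⟩ := t
  unfold pvFound
  rw [mem_pvPairsR cas (pvKs cas) (by unfold pvKs; exact PySem.Set.nodup_ofList _)]
  constructor
  · rintro ⟨ka, hka, kb, hkb, hne, ht⟩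
    unfold pvContrib at ht
    split at ht
    case isFalse => simp at ht
    case isTrue hpos =>
    rw [mem_pvExpand] at ht
    obtain ⟨i, hi', j, hj', hval⟩ := ht
    rw [mem_pvIdxs] at hi' hj'
    obtain ⟨hi0, hiw, hci⟩ := hi'
    obtain ⟨hj0, hjw, hcj⟩ := hj'
    subst hci
    subst hcj
    rw [pvScan_cols] at hpos
    have hij : i ≠ j := fun he => hne (he ▸ rfl)
    rcases hds : pvDs cas i j with _ | ⟨q, _ | ⟨q2, l⟩⟩
    · rw [hds] at hpos
      simp at hpos
    · have hscan : pvScanAux (pvCol cas i) (pvCol cas j)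
          (PySem.List.pyRange 0 (pvN cas) 1) (-1) = q := by
        rw [pvScan_cols, hds]
      rw [hscan] at hval
      unfold pvNorm at hval
      split at hval
      · next hlt =>
        obtain ⟨rfl, rfl, rfl⟩ := Prod.mk.injEq .. ▸ hval
        exact ⟨hi0, by simpa using hlt, by simpa using hjw, by simpa using hds⟩
      · next hlt =>
        obtain ⟨rfl, rfl, rfl⟩ := Prod.mk.injEq .. ▸ hval
        refine ⟨hj0, by simp; omega, by simpa using hiw, ?_⟩
        simp only
        rw [pvDs_symm]
        simpa using hds
    · rw [hds] at hpos
      simp at hpos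
  · rintro ⟨h1, h2, h3, hds⟩
    simp only at h1 h2 h3 hds
    have hp0 : 0 ≤ p := ((pvDs_singleton_iff cas lo hi p).mp hds).1
    have hcne : pvCol cas lo ≠ pvCol cas hi := by
      intro he
      have hd := ((pvDs_singleton_iff cas lo hi p).mp hds).2.2.1
      unfold pvChar at hd
      rw [he] at hd
      exact hd rfl
    refine ⟨pvCol cas lo, mem_pvKs_of cas h1 (by omega), pvCol cas hi,
      mem_pvKs_of cas (by omega) h3, hcne, ?_⟩
    have hscan : pvScanAux (pvCol cas lo) (pvCol cas hi)
        (PySem.List.pyRange 0 (pvN cas) 1) (-1) = p := by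
      rw [pvScan_cols, hds]
    unfold pvContrib
    rw [hscan, if_pos (by omega), mem_pvExpand]
    refine ⟨lo, ?_, hi, ?_, ?_⟩
    · rw [mem_pvIdxs]
      exact ⟨h1, by omega, rfl⟩
    · rw [mem_pvIdxs]
      exact ⟨by omega, h3, rfl⟩
    · unfold pvNorm
      rw [if_pos h2]

theorem pvContrib_cols (cas : List String) (ka kb : List Char) (t : Int × Int × Int)
    (h : t ∈ pvContrib cas ka kb) :
    (pvCol cas t.1 = ka ∧ pvCol cas t.2.1 = kb) ∨
      (pvCol cas t.1 = kb ∧ pvCol cas t.2.1 = ka) := by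
  unfold pvContrib at h
  split at h
  case isFalse => simp at h
  case isTrue hpos =>
  rw [mem_pvExpand] at h
  obtain ⟨i, hi, j, hj, rfl⟩ := h
  rw [mem_pvIdxs] at hi hj
  unfold pvNorm
  split
  · exact Or.inl ⟨hi.2.2, hj.2.2⟩
  · exact Or.inr ⟨hj.2.2, hi.2.2⟩

theorem nodup_pvExpand (pos : Int) (a b : List Int) (ha : a.Nodup) (hb : b.Nodup)
    (hdisj : ∀ x ∈ a, x ∉ b) : (pvExpand pos a b).Nodup := by
  unfold pvExpand
  rw [List.nodup_flatMap]
  constructor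
  · intro i hi
    apply List.Nodup.map_on ?_ hb
    intro j1 hj1 j2 hj2 he
    have hne1 : i ≠ j1 := fun h => hdisj i hi (h ▸ hj1)
    have hne2 : i ≠ j2 := fun h => hdisj i hi (h ▸ hj2)
    unfold pvNorm at he
    split_ifs at he <;> simp [Prod.ext_iff] at he <;> omega
  · apply List.Pairwise.imp_of_mem ?_ ha
    intro i1 i2 h1 h2 hne t ht1 ht2
    simp only [List.mem_map] at ht1 ht2
    obtain ⟨j1, hj1, rfl⟩ := ht1
    obtain ⟨j2, hj2, he⟩ := ht2
    have d1 : i1 ≠ j1 := fun h => hdisj i1 h1 (h ▸ hj1)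
    have d2 : i2 ≠ j2 := fun h => hdisj i2 h2 (h ▸ hj2)
    have d3 : i1 ≠ j2 := fun h => hdisj i1 h1 (h ▸ hj2)
    have d4 : i2 ≠ j1 := fun h => hdisj i2 h2 (h ▸ hj1)
    unfold pvNorm at he
    split_ifs at he <;> simp [Prod.ext_iff] at he <;> omega

theorem nodup_pvContrib (cas : List String) (ka kb : List Char) (hne : ka ≠ kb) :
    (pvContrib cas ka kb).Nodup := by
  unfold pvContrib
  split
  case isFalse => simp
  case isTrue hpos =>
  apply nodup_pvExpand
  · exact ((pairwise_pvIdxs cas ka).imp (fun h => ne_of_lt h))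
  · exact ((pairwise_pvIdxs cas kb).imp (fun h => ne_of_lt h))
  · intro x hx hx'
    rw [mem_pvIdxs] at hx hx'
    exact hne (hx.2.2.symm.trans hx'.2.2)

theorem nodup_pvPairsR (cas : List String) (ks : List (List Char))
    (hnd : ks.Pairwise (· ≠ ·)) : (pvPairsR cas ks).Nodup := by
  induction ks with
  | nil => simp [pvPairsR]
  | cons k ks ih =>
    rw [List.pairwise_cons] at hnd
    obtain ⟨hk, htl⟩ := hnd
    rw [pvPairsR]
    apply List.Nodup.append
    · rw [List.nodup_flatMap]
      refine ⟨fun k' hk' => nodup_pvContrib cas k k' (hk k' hk'), ?_⟩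
      apply List.Pairwise.imp_of_mem ?_ htl
      intro k1 k2 h1 h2 hne12 t ht1 ht2
      have c1 := pvContrib_cols cas k k1 t ht1
      have c2 := pvContrib_cols cas k k2 t ht2
      rcases c1 with ⟨e1, e2⟩ | ⟨e1, e2⟩ <;> rcases c2 with ⟨e3, e4⟩ | ⟨e3, e4⟩
      · exact hne12 (e2.symm.trans e4)
      · exact hk k2 h2 (e1.symm.trans e3)
      · exact hk k1 h1 (e3.symm.trans e1)
      · exact hne12 (e1.symm.trans e3)
    · exact ih htl
    · intro t ht1 ht2
      simp only [List.mem_flatMap] at ht1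
      obtain ⟨k', hk', htc⟩ := ht1
      rw [mem_pvPairsR cas ks htl] at ht2
      obtain ⟨ka, hka, kb, hkb, hkab, htc2⟩ := ht2
      have c1 := pvContrib_cols cas k k' t htc
      have c2 := pvContrib_cols cas ka kb t htc2
      rcases c1 with ⟨e1, e2⟩ | ⟨e1, e2⟩ <;> rcases c2 with ⟨e3, e4⟩ | ⟨e3, e4⟩
      · exact hk ka hka (e1.symm.trans e3)
      · exact hk kb hkb (e1.symm.trans e3)
      · exact hk kb hkb (e2.symm.trans e4)
      · exact hk ka hka (e2.symm.trans e4)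

theorem nodup_pvFound (cas : List String) : (pvFound cas).Nodup := by
  exact nodup_pvPairsR cas (pvKs cas) (PySem.Set.nodup_ofList _)

theorem mem_pvCanon (cas : List String) (t : Int × Int × Int) :
    t ∈ pvCanon cas ↔ pvQ cas t := by
  unfold pvCanon pvQ
  simp only [List.mem_flatMap, PySem.List.mem_pyRange_one]
  constructor
  · rintro ⟨i, hi, j, hj, ht⟩
    split at ht
    · next hlen =>
      simp only [List.mem_singleton] at ht
      obtain ⟨x, hx⟩ := List.length_eq_one_iff.mp hlen
      subst ht
      simp only
      refine ⟨hi.1, by omega, hj.2, ?_⟩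
      rw [hx]
      simp
    · simp at ht
  · rintro ⟨h1, h2, h3, hds⟩
    refine ⟨t.1, ⟨h1, by omega⟩, t.2.1, ⟨by omega, h3⟩, ?_⟩
    rw [hds]
    simp

theorem pairwise_pvCanon (cas : List String) :
    (pvCanon cas).Pairwise
      (fun a b => toLex ((a.1 : Int), (a.2.1 : Int)) < toLex ((b.1 : Int), (b.2.1 : Int))) := by
  unfold pvCanon
  rw [List.pairwise_flatMap]
  constructor
  · intro i hi
    rw [List.pairwise_flatMap]
    refine ⟨fun j hj => by split <;> simp, ?_⟩
    apply List.Pairwise.imp ?_ (PySem.List.pairwise_lt_pyRange_one (i + 1) (pvW cas))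
    intro j1 j2 hlt x hx y hy
    split at hx <;> simp at hx
    split at hy <;> simp at hy
    subst hx; subst hy
    rw [Prod.Lex.lt_iff]
    right
    exact ⟨rfl, hlt⟩
  · apply List.Pairwise.imp ?_ (PySem.List.pairwise_lt_pyRange_one 0 (pvW cas))
    intro i1 i2 hlt x hx y hy
    simp only [List.mem_flatMap] at hx hy
    obtain ⟨j1, _, hx⟩ := hx
    obtain ⟨j2, _, hy⟩ := hy
    split at hx <;> simp at hx
    split at hy <;> simp at hy
    subst hx; subst hy
    rw [Prod.Lex.lt_iff]
    exact Or.inl hlt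

theorem nodup_pvCanon (cas : List String) : (pvCanon cas).Nodup := by
  exact (pairwise_pvCanon cas).imp
    (fun h heq => absurd (heq ▸ h) (lt_irrefl _))

theorem sorted2_eq_sorted_lex {α : Type} (xs : List α) (k1 k2 : α → Int) :
    PySem.List.sorted2 xs k1 k2 false =
      PySem.List.sorted xs (fun x => toLex (k1 x, k2 x)) false := by
  rw [PySem.List.sorted_eq_foldl_insertBy]
  unfold PySem.List.sorted2
  simp only [if_neg (by simp : ¬(false = true))]
  congr 1
  funext acc x
  congr 1
  funext a b
  by_cases h1 : k1 a < k1 b <;> by_cases h2 : k1 b < k1 a <;> by_cases h3 : k2 a < k2 b <;>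
    simp [h1, h2, h3, Prod.Lex.lt_iff] <;> omega

theorem pvB_eq_canon (cas : List String) :
    lidiffcol_alt cas = (pvCanon cas).map (fun t => (t.2.2, t.1)) := by
  rw [pvB_found, sorted2_eq_sorted_lex]
  congr 1
  apply PySem.List.sorted_eq_of_perm_of_pairwise_lt
  · exact (List.perm_ext_iff_of_nodup (nodup_pvCanon cas) (nodup_pvFound cas)).mpr
      (fun t => (mem_pvCanon cas t).trans (mem_pvFound cas t).symm)
  · exact pairwise_pvCanon cas

-- ===== VERDICT (by name: the statement is the Claim_ definition above) =====
theorem lidiffcol_spec : Claim_equal_lidiffcol := by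
  intro cas _ _
  unfold Spec_lidiffcol
  rw [pvA_eq_canon cas, pvB_eq_canon cas]
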